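-- pv_equiv track=rewrite | github.com/umazhar/FlyPad-System | Desktop/Code/STROBE/SOFTWARE/STROBE_postprocessing/strobelib.py | sip_duration
-- ===== SOURCE A (Python) =====
-- LED_GRAPHICAL_SCALE = 2000;
--
-- LED_ON = 1
--
-- LED_OFF = 0
--
-- def sip_duration(LED_values):
--     # calculate sip duration
--     LED_value_prev = 0
--     sip_duration_array = []
--     current_LED_value_index = 0
--     while (current_LED_value_index < len(LED_values)):
--         current_sip_duration = 0
--         LED_value = LED_values[current_LED_value_index]
--         if (LED_value == LED_GRAPHICAL_SCALE * LED_ON) and (LED_value_prev == LED_OFF):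
--             while (LED_value == LED_GRAPHICAL_SCALE * LED_ON):
--                 current_sip_duration += 1
--                 LED_value_prev = LED_value
--                 current_LED_value_index += 1
--                 if current_LED_value_index < len(LED_values):
--                     LED_value = LED_values[current_LED_value_index]
--                 else:
--                     break
--             sip_duration_array.append(current_sip_duration)
--         current_LED_value_index += 1
--         LED_value_prev = LED_value
--     return sip_duration_array
-- ===== SOURCE B (Python) =====
-- LED_GRAPHICAL_SCALE = 2000
--
-- LED_ON = 1
--
-- LED_OFF = 0
--
-- def _groups(xs):
--     # maximal runs of equal consecutive values, as (value, run_length) pairs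
--     groups = []
--     i = 0
--     n = len(xs)
--     while i < n:
--         v = xs[i]
--         j = i + 1
--         while j < n and xs[j] == v:
--             j += 1
--         groups.append((v, j - i))
--         i = j
--     return groups
--
-- def sip_duration(LED_values):
--     # group-first pass: a run of LED-on values counts only when the previous
--     # group's value was LED_OFF (or the run starts the trace)
--     sip_duration_array = []
--     prev = LED_OFF
--     for v, n in _groups(LED_values):
--         if v == LED_GRAPHICAL_SCALE * LED_ON and prev == LED_OFF:
--             sip_duration_array.append(n)
--         prev = v
--     return sip_duration_array
-- ===== Notes on version B (the rewrite author's own statement) =====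
-- stated objective: idiomatic
-- what changed: A's index-driven scan with a nested conditional inner while (and its skip-one-after-a-run bookkeeping) is replaced by a group-first decomposition: build the (value, run-length) groups once, then a single filter pass keeping runs of 2000 whose previous group's value was 0.
import Mathlib
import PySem

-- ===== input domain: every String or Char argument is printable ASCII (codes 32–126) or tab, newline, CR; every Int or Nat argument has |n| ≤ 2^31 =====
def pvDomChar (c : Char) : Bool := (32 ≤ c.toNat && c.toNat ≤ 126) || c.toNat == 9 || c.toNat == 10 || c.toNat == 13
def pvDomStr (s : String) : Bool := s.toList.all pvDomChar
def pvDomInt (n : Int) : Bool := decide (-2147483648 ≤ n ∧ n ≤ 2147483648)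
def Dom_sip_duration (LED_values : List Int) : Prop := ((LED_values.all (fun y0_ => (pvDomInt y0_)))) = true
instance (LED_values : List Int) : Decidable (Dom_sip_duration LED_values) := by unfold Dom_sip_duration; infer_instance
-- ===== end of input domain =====

-- B is a structurally different, more idiomatic re-implementation (group-first pass); A = B on all inputs.
-- Both while-loops are ported with a fuel parameter that only makes the recursion structural; the
-- initial fuel is always sufficient, so the exhausted-fuel arms are never reached from the entry point.

-- ===== PORT A =====
-- inner while loop of A: counts consecutive 2000s advancing the index; returns
-- (current_sip_duration, current_LED_value_index, LED_value) at loop exit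
def sipInner (xs : List Int) (fuel i : Nat) (c val : Int) : Int × Nat × Int :=
  match fuel with
  | 0 => (c, i, val)   -- fuel exhausted (never reached with the initial fuel)
  | f + 1 =>
    if val = 2000 then
      if h : i + 1 < xs.length then sipInner xs f (i + 1) (c + 1) xs[i + 1]
      else (c + 1, i + 1, val)
    else (c, i, val)

-- outer while loop of A
def sipLoopA (xs : List Int) (fuel i : Nat) (prev : Int) (acc : List Int) : List Int :=
  match fuel with
  | 0 => acc   -- fuel exhausted (never reached with the initial fuel)
  | f + 1 =>
    if h : i < xs.length then
      let val := xs[i]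
      if val = 2000 ∧ prev = 0 then
        let r := sipInner xs (xs.length - i) i 0 val
        sipLoopA xs f (r.2.1 + 1) r.2.2 (acc ++ [r.1])
      else sipLoopA xs f (i + 1) val acc
    else acc

def sip_duration (LED_values : List Int) : List Int :=
  sipLoopA LED_values (LED_values.length + 1) 0 0 []

-- ===== PORT B =====
-- length of the leading run of v in a list (the inner count of _groups)
def runLen (v : Int) : List Int → Nat
  | [] => 0
  | x :: t => if x = v then 1 + runLen v t else 0

-- _groups: maximal runs of equal consecutive values as (value, run_length) pairs;
-- the inner j-advancing while is the leading-run count runLen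
def pyGroupsIdx (xs : List Int) (fuel i : Nat) : List (Int × Int) :=
  match fuel with
  | 0 => []   -- fuel exhausted (never reached with the initial fuel)
  | f + 1 =>
    if h : i < xs.length then
      let j := i + 1 + runLen xs[i] (xs.drop (i + 1))
      (xs[i], (j : Int) - (i : Int)) :: pyGroupsIdx xs f j
    else []

-- the filtering for-loop of B, carrying prev
def sipFilterB : List (Int × Int) → Int → List Int
  | [], _ => []
  | (v, n) :: gs, prev =>
    if v = 2000 ∧ prev = 0 then n :: sipFilterB gs v else sipFilterB gs v

def sip_duration_alt (LED_values : List Int) : List Int :=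
  sipFilterB (pyGroupsIdx LED_values LED_values.length 0) 0

-- ===== PRECONDITION & SPEC =====
def Spec_sip_duration (LED_values : List Int) (out : List Int) : Prop := out = sip_duration_alt LED_values
instance (LED_values : List Int) (out : List Int) : Decidable (Spec_sip_duration LED_values out) := by unfold Spec_sip_duration; infer_instance

-- ===== CLAIM (what is proved, stated in full; the proofs are below) =====
def Claim_equal_sip_duration : Prop := ∀ (LED_values : List Int), Dom_sip_duration LED_values → Spec_sip_duration LED_values (sip_duration LED_values)

-- ===== LEMMAS AND PROOFS =====

-- list-level view of _groups used only by the proofs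
def pyGroups (fuel : Nat) (l : List Int) : List (Int × Int) :=
  match fuel, l with
  | _, [] => []
  | 0, _ => []
  | f + 1, x :: rest => (x, (1 + runLen x rest : Int)) :: pyGroups f (rest.drop (runLen x rest))

theorem pyGroups_nil (f : Nat) : pyGroups f [] = [] := by
  cases f <;> simp [pyGroups]

theorem pyGroups_fuel : ∀ (f1 : Nat) (l : List Int) (f2 : Nat),
    l.length ≤ f1 → l.length ≤ f2 → pyGroups f1 l = pyGroups f2 l := by
  intro f1
  induction f1 with
  | zero =>
    intro l f2 h1 _
    have hl : l = [] := List.eq_nil_of_length_eq_zero (Nat.le_zero.mp h1)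
    subst hl
    rw [pyGroups_nil, pyGroups_nil]
  | succ f ih =>
    intro l f2 h1 h2
    cases l with
    | nil => rw [pyGroups_nil, pyGroups_nil]
    | cons x rest =>
      cases f2 with
      | zero => simp at h2
      | succ f2' =>
        simp only [pyGroups]
        congr 1
        apply ih
        · simp only [List.length_drop]
          simp at h1
          omega
        · simp only [List.length_drop]
          simp at h2
          omega

theorem runLen_get (v : Int) : ∀ (l : List Int) (k : Nat), runLen v l = k → (h : k < l.length) → l[k] ≠ v := by
  intro l
  induction l with
  | nil => intro k hk h; simp at h
  | cons x t ih =>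
    intro k hk h
    by_cases hx : x = v
    · have hk' : k = runLen v t + 1 := by simp [runLen, hx] at hk; omega
      subst hk'
      have ht : runLen v t < t.length := by simpa using h
      simpa using ih (runLen v t) rfl ht
    · have hk' : k = 0 := by simp [runLen, hx] at hk; omega
      subst hk'
      simpa using hx

-- a leading run of value v never matters when prev is already v
theorem sipFilterB_dropRun (v : Int) (l : List Int) (f : Nat) (hf : l.length ≤ f) :
    sipFilterB (pyGroups f (l.drop (runLen v l))) v = sipFilterB (pyGroups f l) v := by
  cases l with
  | nil => simp [runLen]
  | cons x t =>
    by_cases hx : x = v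
    · subst hx
      cases f with
      | zero => simp at hf
      | succ f' =>
        have hr : runLen x (x :: t) = 1 + runLen x t := by simp [runLen]
        have hcond : ¬ (x = 2000 ∧ x = 0) := by rintro ⟨h1, h2⟩; omega
        have hd : (x :: t).drop (1 + runLen x t) = t.drop (runLen x t) := by
          rw [Nat.add_comm]; simp
        rw [hr, hd]
        conv_rhs => simp only [pyGroups]
        simp only [sipFilterB]
        rw [if_neg hcond]
        apply congrArg (fun gs => sipFilterB gs x)
        apply pyGroups_fuel
        · simp only [List.length_drop]
          simp at hf
          omega
        · simp only [List.length_drop]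
          simp at hf
          omega
    · simp [runLen, hx]

def nextVal (xs : List Int) (j : Nat) : Int :=
  if h : j < xs.length then xs[j] else 2000

theorem sipInner_spec (xs : List Int) :
    ∀ (fuel i : Nat) (c : Int), xs.length - i ≤ fuel → (h : i < xs.length) → xs[i] = 2000 →
    sipInner xs fuel i c 2000 =
      (c + 1 + (runLen 2000 (xs.drop (i + 1)) : Int),
       i + 1 + runLen 2000 (xs.drop (i + 1)),
       nextVal xs (i + 1 + runLen 2000 (xs.drop (i + 1)))) := by
  intro fuel
  induction fuel with
  | zero => intro i c hn h _; omega
  | succ f ih =>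
    intro i c hn h hv
    simp only [sipInner]
    rw [if_pos trivial]
    by_cases h1 : i + 1 < xs.length
    · rw [dif_pos h1]
      have hdrop : xs.drop (i + 1) = xs[i + 1] :: xs.drop (i + 2) :=
        List.drop_eq_getElem_cons h1
      by_cases h2 : xs[i + 1] = 2000
      · have hrec := ih (i + 1) (c + 1) (by omega) h1 h2
        simp only [show i + 1 + 1 = i + 2 from rfl] at hrec
        rw [h2, hrec, hdrop]
        simp only [runLen, if_pos h2, Prod.mk.injEq]
        refine ⟨by push_cast; ring, by omega, ?_⟩
        have he2 : i + 1 + (1 + runLen 2000 (List.drop (i + 2) xs))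
            = i + 2 + runLen 2000 (List.drop (i + 2) xs) := by omega
        rw [he2]
      · rw [hdrop]
        simp only [runLen, if_neg h2]
        cases f <;> simp [sipInner, if_neg h2, nextVal, h1]
    · rw [dif_neg h1]
      have hd : xs.drop (i + 1) = [] := List.drop_eq_nil_of_le (by omega)
      rw [hd]
      simp [runLen, nextVal, h1]

theorem sipLoopA_eq (xs : List Int) :
    ∀ (fuel i : Nat) (prev : Int) (acc : List Int) (gf : Nat),
    xs.length - i ≤ fuel → xs.length - i ≤ gf →
    sipLoopA xs fuel i prev acc = acc ++ sipFilterB (pyGroups gf (xs.drop i)) prev := by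
  intro fuel
  induction fuel with
  | zero =>
    intro i prev acc gf hn _
    simp only [sipLoopA]
    rw [List.drop_eq_nil_of_le (by omega), pyGroups_nil]
    simp [sipFilterB]
  | succ f ih =>
    intro i prev acc gf hn hg
    simp only [sipLoopA]
    by_cases hi : i < xs.length
    · rw [dif_pos hi]
      have hdrop : xs.drop i = xs[i] :: xs.drop (i + 1) := List.drop_eq_getElem_cons hi
      obtain ⟨gg, rfl⟩ : ∃ gg, gf = gg + 1 := ⟨gf - 1, by omega⟩
      by_cases hcond : xs[i] = 2000 ∧ prev = 0
      · obtain ⟨hv, hp⟩ := hcond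
        rw [if_pos ⟨hv, hp⟩]
        rw [hv, sipInner_spec xs (xs.length - i) i 0 (Nat.le_refl _) hi hv]
        set R := runLen 2000 (xs.drop (i + 1)) with hR
        rw [hdrop, hp, hv]
        conv_rhs => simp only [pyGroups]
        rw [← hR]
        simp only [sipFilterB]
        rw [if_pos (by norm_num)]
        rw [List.drop_drop]
        by_cases hlt : i + 1 + R < xs.length
        · have hVdef : nextVal xs (i + 1 + R) = xs[i + 1 + R] := by simp [nextVal, hlt]
          rw [hVdef]
          have hVne : xs[i + 1 + R] ≠ 2000 := by
            have hRlt : R < (xs.drop (i + 1)).length := by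
              rw [List.length_drop]; omega
            have hg' : (xs.drop (i + 1))[R] = xs[i + 1 + R] := by
              rw [List.getElem_drop]
            have := runLen_get 2000 (xs.drop (i + 1)) R hR.symm hRlt
            rw [hg'] at this; exact this
          obtain ⟨g2, rfl⟩ : ∃ g2, gg = g2 + 1 := ⟨gg - 1, by omega⟩
          rw [ih (i + 1 + R + 1) xs[i + 1 + R] (acc ++ [0 + 1 + (R : Int)]) g2 (by omega) (by omega)]
          have hdrop2 : xs.drop (i + 1 + R) = xs[i + 1 + R] :: xs.drop (i + 1 + R + 1) :=
            List.drop_eq_getElem_cons hlt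
          rw [hdrop2]
          conv_rhs => simp only [pyGroups]
          simp only [sipFilterB]
          rw [if_neg (by rintro ⟨h1, _⟩; exact hVne h1)]
          rw [sipFilterB_dropRun xs[i + 1 + R] (xs.drop (i + 1 + R + 1)) g2
            (by rw [List.length_drop]; omega)]
          simp
        · have hVdef : nextVal xs (i + 1 + R) = 2000 := by
            unfold nextVal
            rw [dif_neg hlt]
          rw [hVdef]
          rw [ih (i + 1 + R + 1) 2000 (acc ++ [0 + 1 + (R : Int)]) gg (by omega) (by omega)]
          have h1 : xs.drop (i + 1 + R) = [] := List.drop_eq_nil_of_le (by omega)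
          have h2 : xs.drop (i + 1 + R + 1) = [] := List.drop_eq_nil_of_le (by omega)
          rw [h1, h2]
          simp [pyGroups_nil, sipFilterB]
      · rw [if_neg hcond]
        rw [ih (i + 1) xs[i] acc gg (by omega) (by omega)]
        rw [hdrop]
        conv_rhs => simp only [pyGroups]
        simp only [sipFilterB]
        rw [if_neg hcond]
        rw [sipFilterB_dropRun xs[i] (xs.drop (i + 1)) gg (by rw [List.length_drop]; omega)]
    · rw [dif_neg hi]
      rw [List.drop_eq_nil_of_le (by omega), pyGroups_nil]
      simp [sipFilterB]

theorem pyGroupsIdx_eq (xs : List Int) :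
    ∀ (fuel i : Nat), pyGroupsIdx xs fuel i = pyGroups fuel (xs.drop i) := by
  intro fuel
  induction fuel with
  | zero =>
    intro i
    cases h : xs.drop i <;> simp [pyGroupsIdx, pyGroups]
  | succ f ih =>
    intro i
    by_cases h : i < xs.length
    · simp only [pyGroupsIdx, dif_pos h]
      rw [List.drop_eq_getElem_cons h]
      simp only [pyGroups]
      refine congrArg₂ List.cons ?_ ?_
      · refine congrArg (Prod.mk xs[i]) ?_
        push_cast
        ring
      · rw [ih (i + 1 + runLen xs[i] (xs.drop (i + 1))), List.drop_drop]
    · simp only [pyGroupsIdx, dif_neg h]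
      rw [List.drop_eq_nil_of_le (by omega), pyGroups_nil]

-- ===== VERDICT (by name: the statement is the Claim_ definition above) =====
theorem sip_duration_spec : Claim_equal_sip_duration := by
  intro xs _
  unfold Spec_sip_duration sip_duration sip_duration_alt
  rw [pyGroupsIdx_eq xs xs.length 0, List.drop_zero]
  have h := sipLoopA_eq xs (xs.length + 1) 0 0 [] xs.length (by omega) (by omega)
  simpa using h
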